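-- pv_equiv track=rewrite | github.com/NASP-THU/ProphetFuzz | fuzzing_handler/fix_argvs.py | processQuotation
-- ===== SOURCE A (Python) =====
-- def processQuotation(s):
--     stack = []
--     pairs = []
--     escaped = set()
--
--     tmp_list = []
--     for word in s.split(" "):
--         if word.startswith('\\"') or word.startswith("\\'"):
--             word = '"' + word[2:]
--         if word.endswith('\\"') or word.endswith("\\'"):
--             word = word[:-2] + '"'
--         tmp_list.append(word)
--     s = ' '.join(tmp_list)
--
--     i = 0
--     while i < len(s):
--         if s[i] == '\\' and i + 1 < len(s):
--             if s[i + 1] in "\"'":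
--                 escaped.add(i + 1)
--             i += 2
--         elif s[i] in "\"'" and i not in escaped:
--             if stack and stack[-1][0] == s[i]:
--                 start_pos = stack.pop()[1]
--                 pairs.append((start_pos, i))
--             else:
--                 stack.append((s[i], i))
--             i += 1
--         else:
--             i += 1
--
--     result = list(s)
--     for start, end in pairs:
--         result[start] = '"'
--         result[end] = '"'
--         for j in range(start + 1, end):
--             if result[j] in ['"', "'"] and (j - 1 < 0 or result[j - 1] != '\\'):
--                 result[j] = "'"
--     return ''.join(result)
-- ===== SOURCE B (Python) =====
-- def processQuotation(s):
--     # Same word-level normalization as the original.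
--     words = []
--     for word in s.split(" "):
--         if word.startswith('\\"') or word.startswith("\\'"):
--             word = '"' + word[2:]
--         if word.endswith('\\"') or word.endswith("\\'"):
--             word = word[:-2] + '"'
--         words.append(word)
--     s = " ".join(words)
--     n = len(s)
--     # Single scan: mark matched-pair endpoints and a difference array for
--     # "strictly inside some matched pair".
--     diff = [0] * (n + 1)
--     endpoint = [False] * n
--     stack = []
--     i = 0
--     while i < n:
--         c = s[i]
--         if c == '\\' and i + 1 < n:
--             i += 2
--             continue
--         if c in '"\'':
--             if stack and stack[-1][0] == c:
--                 a = stack.pop()[1]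
--                 endpoint[a] = True
--                 endpoint[i] = True
--                 diff[a + 1] += 1
--                 diff[i] -= 1
--             else:
--                 stack.append((c, i))
--         i += 1
--     # One pass: the running depth tells whether a position is strictly inside
--     # a matched pair; that alone decides its final quote character.
--     out = []
--     depth = 0
--     for j in range(n):
--         depth += diff[j]
--         c = s[j]
--         if depth > 0 and c in '"\'' and s[j - 1] != '\\':
--             out.append("'")
--         elif endpoint[j]:
--             out.append('"')
--         else:
--             out.append(c)
--     return ''.join(out)
-- ===== Notes on version B (the rewrite author's own statement) =====
-- stated objective: alternative
-- what changed: A collects matched quote pairs and then, for every pair, rewrites the whole interior span again; B does one scan that marks pair endpoints and a difference array, then a single depth-counting pass decides each position's final quote character, so no interior span is ever re-traversed.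
import Mathlib
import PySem

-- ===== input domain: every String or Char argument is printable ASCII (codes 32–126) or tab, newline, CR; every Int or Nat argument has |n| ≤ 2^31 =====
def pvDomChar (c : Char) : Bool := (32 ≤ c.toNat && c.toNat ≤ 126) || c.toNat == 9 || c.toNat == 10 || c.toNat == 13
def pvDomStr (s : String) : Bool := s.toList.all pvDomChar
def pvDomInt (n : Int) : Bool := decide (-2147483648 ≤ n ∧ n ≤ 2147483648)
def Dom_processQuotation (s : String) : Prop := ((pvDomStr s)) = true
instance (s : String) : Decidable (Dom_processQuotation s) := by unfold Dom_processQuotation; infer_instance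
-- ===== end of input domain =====

-- B replaces A's per-pair interior rewriting by one scan marking endpoints and a
-- difference array plus a single depth-counting output pass (a different algorithm,
-- not measurably faster on the benchmark inputs).

-- ===== PORT A =====

-- word-level normalization: the first for-loop of A ('\\"'-prefixed/suffixed words)
def pvFixWordA (w : List Char) : List Char :=
  let w1 := if PySem.Chars.startswith w ['\\', '"'] || PySem.Chars.startswith w ['\\', '\''] then
              '"' :: PySem.List.slice w (some 2) none
            else w
  if PySem.Chars.endswith w1 ['\\', '"'] || PySem.Chars.endswith w1 ['\\', '\''] then
    PySem.List.slice w1 none (some (-2)) ++ ['"']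
  else w1

def pvNormA (cs : List Char) : List Char :=
  PySem.Chars.join [' ']
    ((PySem.Chars.splitOn cs [' ']).foldl (fun acc w => acc ++ [pvFixWordA w]) [])

-- the while-loop of A; the Python stack appends/pops at the END, modelled with the head
-- of the list as the stack top (same values, same order of operations)
def pvScanA (cs : List Char) (i : Nat) (stack : List (Char × Nat))
    (pairs : List (Nat × Nat)) (escaped : PySem.Set Nat) : List (Nat × Nat) :=
  if h : i < cs.length then
    if h2 : cs[i] = '\\' ∧ i + 1 < cs.length then
      let esc := if cs[i+1]'h2.2 = '"' ∨ cs[i+1]'h2.2 = '\'' then PySem.Set.add escaped (i+1)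
                 else escaped
      pvScanA cs (i+2) stack pairs esc
    else if (cs[i] = '"' ∨ cs[i] = '\'') ∧ ¬ (i ∈ escaped) then
      match stack with
      | (q, a) :: rest =>
        if q = cs[i] then pvScanA cs (i+1) rest (pairs ++ [(a, i)]) escaped
        else pvScanA cs (i+1) ((cs[i], i) :: (q, a) :: rest) pairs escaped
      | [] => pvScanA cs (i+1) [(cs[i], i)] pairs escaped
    else pvScanA cs (i+1) stack pairs escaped
  else pairs
termination_by cs.length - i
decreasing_by all_goals omega

-- body of A's inner 'for j in range(start+1, end)' loop
def pvInnerStepA (res : List Char) (j : Int) : List Char :=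
  if (PySem.List.pyGetD res j ' ' = '"' ∨ PySem.List.pyGetD res j ' ' = '\'')
     ∧ (j - 1 < 0 ∨ PySem.List.pyGetD res (j - 1) ' ' ≠ '\\') then
    PySem.List.pySetD res j '\''
  else res

-- one iteration of A's 'for start, end in pairs' loop
def pvApplyPairA (res : List Char) (p : Nat × Nat) : List Char :=
  let r1 := PySem.List.pySetD res (p.1 : Int) '"'
  let r2 := PySem.List.pySetD r1 (p.2 : Int) '"'
  (PySem.List.pyRange ((p.1 : Int) + 1) (p.2 : Int) 1).foldl pvInnerStepA r2

def processQuotation (s : String) : String :=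
  let cs := pvNormA s.toList
  let pairs := pvScanA cs 0 [] [] PySem.Set.empty
  String.ofList (pairs.foldl pvApplyPairA cs)

-- ===== PORT B =====

-- same word-level normalization as A performs (Source B keeps it unchanged)
def pvFixWordB (w : List Char) : List Char :=
  let w1 := if PySem.Chars.startswith w ['\\', '"'] || PySem.Chars.startswith w ['\\', '\''] then
              '"' :: PySem.List.slice w (some 2) none
            else w
  if PySem.Chars.endswith w1 ['\\', '"'] || PySem.Chars.endswith w1 ['\\', '\''] then
    PySem.List.slice w1 none (some (-2)) ++ ['"']
  else w1

def pvNormB (cs : List Char) : List Char :=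
  PySem.Chars.join [' ']
    ((PySem.Chars.splitOn cs [' ']).foldl (fun acc w => acc ++ [pvFixWordB w]) [])

-- Source B's scan: marks matched endpoints and the ±1 difference array (stack top = list head)
def pvScanB (cs : List Char) (i : Nat) (stack : List (Char × Nat))
    (ep : List Bool) (diff : List Int) : List Bool × List Int :=
  if h : i < cs.length then
    if _h2 : cs[i] = '\\' ∧ i + 1 < cs.length then
      pvScanB cs (i+2) stack ep diff
    else if cs[i] = '"' ∨ cs[i] = '\'' then
      match stack with
      | (q, a) :: rest =>
        if q = cs[i] then
          let ep' := PySem.List.pySetD (PySem.List.pySetD ep (a : Int) true) (i : Int) true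
          let d1 := PySem.List.pySetD diff ((a : Int) + 1)
                      (PySem.List.pyGetD diff ((a : Int) + 1) 0 + 1)
          let d2 := PySem.List.pySetD d1 (i : Int) (PySem.List.pyGetD d1 (i : Int) 0 - 1)
          pvScanB cs (i+1) rest ep' d2
        else pvScanB cs (i+1) ((cs[i], i) :: (q, a) :: rest) ep diff
      | [] => pvScanB cs (i+1) [(cs[i], i)] ep diff
    else pvScanB cs (i+1) stack ep diff
  else (ep, diff)
termination_by cs.length - i
decreasing_by all_goals omega

-- Source B's final output pass: running depth over the difference array
def pvPassB (cs : List Char) (ep : List Bool) (diff : List Int)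
    (j : Nat) (depth : Int) (acc : List Char) : List Char :=
  if h : j < cs.length then
    let depth' := depth + PySem.List.pyGetD diff (j : Int) 0
    if 0 < depth' ∧ (cs[j] = '"' ∨ cs[j] = '\'')
       ∧ PySem.List.pyGetD cs ((j : Int) - 1) ' ' ≠ '\\' then
      pvPassB cs ep diff (j+1) depth' (acc ++ ['\''])
    else if PySem.List.pyGetD ep (j : Int) false = true then
      pvPassB cs ep diff (j+1) depth' (acc ++ ['"'])
    else
      pvPassB cs ep diff (j+1) depth' (acc ++ [cs[j]])
  else acc
termination_by cs.length - j
decreasing_by all_goals omega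

def processQuotation_alt (s : String) : String :=
  let cs := pvNormB s.toList
  let eb := pvScanB cs 0 [] (List.replicate cs.length false) (List.replicate (cs.length + 1) 0)
  String.ofList (pvPassB cs eb.1 eb.2 0 0 [])

-- ===== PRECONDITION & SPEC =====
def Spec_processQuotation (s : String) (out : String) : Prop := out = processQuotation_alt s
instance (s : String) (out : String) : Decidable (Spec_processQuotation s out) := by unfold Spec_processQuotation; infer_instance

-- ===== CLAIM (what is proved, stated in full; the proofs are below) =====
def Claim_equal_processQuotation : Prop := ∀ (s : String), Dom_processQuotation s → Spec_processQuotation s (processQuotation s)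

-- ===== LEMMAS AND PROOFS =====

-- quote test used throughout the proofs
def pvQuote (c : Char) : Bool := c == '"' || c == '\''

-- endpoint array / difference array that pvScanB's state equals, expressed as a fold over A's pairs
def pvEpA (n : Nat) (pairs : List (Nat × Nat)) : List Bool :=
  pairs.foldl (fun E p => (E.set p.1 true).set p.2 true) (List.replicate n false)

def pvDiffA (n : Nat) (pairs : List (Nat × Nat)) : List Int :=
  pairs.foldl (fun D p =>
    let D1 := D.set (p.1 + 1) (D.getD (p.1 + 1) 0 + 1)
    D1.set p.2 (D1.getD p.2 0 - 1)) (List.replicate (n + 1) 0)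

-- how many pairs strictly contain position j / is j an endpoint of some pair
def pvIn (pairs : List (Nat × Nat)) (j : Nat) : Nat :=
  pairs.countP (fun p => decide (p.1 < j ∧ j < p.2))

def pvEpAt (pairs : List (Nat × Nat)) (j : Nat) : Bool :=
  pairs.any (fun p => p.1 == j || p.2 == j)

-- the per-position characterisation of the final string both programs compute
def pvRule (cs : List Char) (pairs : List (Nat × Nat)) (j : Nat) : Char :=
  if 0 < pvIn pairs j ∧ pvQuote (cs.getD j ' ') = true ∧ cs.getD (j - 1) ' ' ≠ '\\' then '\''
  else if pvEpAt pairs j then '"' else cs.getD j ' '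

-- invariant of the pair list produced by the scan: bounds, quote endpoints, and
-- the earlier-closing pair is nested in or disjoint from any later one
def PairsOk (cs : List Char) (pairs : List (Nat × Nat)) : Prop :=
  (∀ p ∈ pairs, p.1 < p.2 ∧ p.2 < cs.length ∧
      pvQuote (cs.getD p.1 ' ') = true ∧ pvQuote (cs.getD p.2 ' ') = true) ∧
  pairs.Pairwise (fun P Q => P.2 < Q.2 ∧ (P.2 < Q.1 ∨ Q.1 < P.1))

theorem pv_getD_set {α : Type} (l : List α) (i j : Nat) (v d : α) :
    (l.set i v).getD j d = if i = j ∧ i < l.length then v else l.getD j d := by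
  simp [List.getD_eq_getElem?_getD, List.getElem?_set]
  split_ifs with h1 h2 h3 <;> simp_all
  omega

theorem pv_foldl_len {α β : Type} (f : List α → β → List α)
    (hf : ∀ l x, (f l x).length = l.length) :
    ∀ (ps : List β) (l : List α), (ps.foldl f l).length = l.length := by
  intro ps
  induction ps with
  | nil => intro l; rfl
  | cons x xs ih => intro l; rw [List.foldl_cons, ih, hf]

theorem pvEpA_length (n : Nat) (pairs : List (Nat × Nat)) : (pvEpA n pairs).length = n := by
  unfold pvEpA
  rw [pv_foldl_len _ (by intro l x; simp)]
  simp

theorem pvDiffA_length (n : Nat) (pairs : List (Nat × Nat)) :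
    (pvDiffA n pairs).length = n + 1 := by
  unfold pvDiffA
  rw [pv_foldl_len _ (by intro l x; simp)]
  simp

theorem pvEpA_getD (n : Nat) (pairs : List (Nat × Nat))
    (hb : ∀ p ∈ pairs, p.1 < n ∧ p.2 < n) (k : Nat) :
    (pvEpA n pairs).getD k false = pvEpAt pairs k := by
  induction pairs using List.reverseRecOn with
  | nil =>
    simp only [pvEpA, List.foldl_nil, pvEpAt, List.any_nil,
      List.getD_eq_getElem?_getD, List.getElem?_replicate]
    split <;> simp
  | append_singleton ps p ih =>
    have hps : ∀ q ∈ ps, q.1 < n ∧ q.2 < n := fun q hq => hb q (by simp [hq])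
    have hp := hb p (by simp)
    have h1 : (pvEpA n ps).length = n := pvEpA_length n ps
    have : pvEpA n (ps ++ [p]) = ((pvEpA n ps).set p.1 true).set p.2 true := by
      simp [pvEpA, List.foldl_append]
    rw [this, pv_getD_set, pv_getD_set]
    have h2 : ((pvEpA n ps).set p.1 true).length = n := by simp [h1]
    rw [h2, h1, ih hps]
    have hrhs : pvEpAt (ps ++ [p]) k = (pvEpAt ps k || (p.1 == k || p.2 == k)) := by
      simp [pvEpAt, List.any_append]
    rw [hrhs]
    by_cases e1 : p.2 = k
    · rw [if_pos ⟨e1, by omega⟩]; simp [e1]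
    · rw [if_neg (by tauto)]
      by_cases e2 : p.1 = k
      · rw [if_pos ⟨e2, by omega⟩]; simp [e2]
      · rw [if_neg (by tauto)]
        simp [e1, e2]

theorem pvDiffA_getD (n : Nat) (pairs : List (Nat × Nat))
    (hb : ∀ p ∈ pairs, p.1 < p.2 ∧ p.2 < n) (k : Nat) :
    (pvDiffA n pairs).getD k 0 =
      (pairs.countP (fun p => p.1 + 1 == k) : Int) - (pairs.countP (fun p => p.2 == k) : Int) := by
  induction pairs using List.reverseRecOn with
  | nil =>
    simp only [pvDiffA, List.foldl_nil, List.countP_nil,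
      List.getD_eq_getElem?_getD, List.getElem?_replicate]
    split <;> simp
  | append_singleton ps p ih =>
    have hps : ∀ q ∈ ps, q.1 < q.2 ∧ q.2 < n := fun q hq => hb q (by simp [hq])
    have hp := hb p (by simp)
    have h1 : (pvDiffA n ps).length = n + 1 := pvDiffA_length n ps
    have hstep : pvDiffA n (ps ++ [p]) =
        ((pvDiffA n ps).set (p.1 + 1) ((pvDiffA n ps).getD (p.1 + 1) 0 + 1)).set p.2
          (((pvDiffA n ps).set (p.1 + 1) ((pvDiffA n ps).getD (p.1 + 1) 0 + 1)).getD p.2 0 - 1) := by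
      simp [pvDiffA, List.foldl_append]
    rw [hstep]
    simp only [List.countP_append, List.countP_singleton, pv_getD_set, List.length_set, h1]
    rw [ih hps]
    have hL : (pvDiffA n ps).length = n + 1 := h1
    obtain ⟨hp1, hp2⟩ := hb p (by simp)
    have hk1 : p.1 + 1 < n := by omega
    by_cases e1 : p.1 + 1 = k <;> by_cases e2 : p.2 = k <;>
      · simp only [e1, e2]
        split_ifs <;> simp_all <;> omega

theorem pvIn_zero (pairs : List (Nat × Nat)) : pvIn pairs 0 = 0 := by
  unfold pvIn
  rw [List.countP_eq_zero]
  intro p _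
  simp

theorem pvIn_succ (j : Nat) :
    ∀ pairs : List (Nat × Nat), (∀ p ∈ pairs, p.1 < p.2) →
      pvIn pairs (j+1) + pairs.countP (fun p => p.2 == j+1) =
        pvIn pairs j + pairs.countP (fun p => p.1 + 1 == j+1) := by
  intro pairs
  induction pairs with
  | nil => intro _; simp [pvIn]
  | cons q qs ih =>
    intro hb
    have hq := hb q (by simp)
    have ihh := ih (fun p hp => hb p (List.mem_cons_of_mem _ hp))
    simp only [pvIn, List.countP_cons, decide_eq_true_eq, beq_iff_eq] at ihh ⊢
    split_ifs <;> omega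

theorem pvQuote_ne_bs (c : Char) (h : pvQuote c = true) : c ≠ '\\' := by
  simp [pvQuote] at h
  rcases h with h | h <;> subst h <;> decide

theorem pvEpAt_quote (cs : List Char) (pairs : List (Nat × Nat)) (hOk : PairsOk cs pairs)
    (t : Nat) (h : pvEpAt pairs t = true) : pvQuote (cs.getD t ' ') = true := by
  obtain ⟨p, hp, hpe⟩ := List.any_eq_true.mp h
  have hq := hOk.1 p hp
  rcases (by simpa using hpe : p.1 = t ∨ p.2 = t) with h' | h'
  · rw [← h']; exact hq.2.2.1
  · rw [← h']; exact hq.2.2.2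

theorem pvRule_quote (cs : List Char) (pairs : List (Nat × Nat)) (hOk : PairsOk cs pairs)
    (t : Nat) : pvQuote (pvRule cs pairs t) = pvQuote (cs.getD t ' ') := by
  unfold pvRule
  split_ifs with h1 h2
  · rw [h1.2.1]; decide
  · rw [pvEpAt_quote cs pairs hOk t h2]; decide
  · rfl

theorem pvRule_bs (cs : List Char) (pairs : List (Nat × Nat)) (hOk : PairsOk cs pairs)
    (t : Nat) : (pvRule cs pairs t = '\\') ↔ (cs.getD t ' ' = '\\') := by
  unfold pvRule
  split_ifs with h1 h2
  · constructor
    · intro h; exact absurd h (by decide)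
    · intro h; exact absurd h (pvQuote_ne_bs _ h1.2.1)
  · constructor
    · intro h; exact absurd h (by decide)
    · intro h; exact absurd h (pvQuote_ne_bs _ (pvEpAt_quote cs pairs hOk t h2))
  · exact Iff.rfl

theorem pvInnerStepA_length (res : List Char) (j : Int) :
    (pvInnerStepA res j).length = res.length := by
  unfold pvInnerStepA
  split <;> simp [PySem.List.length_pySetD]

theorem pvInner_length (l : List Int) (res : List Char) :
    (l.foldl pvInnerStepA res).length = res.length :=
  pv_foldl_len _ pvInnerStepA_length l res

-- one step of the inner loop, in Nat form (k ≥ 1 keeps Python's j-1 non-negative)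
theorem pvInnerStepA_eq (res : List Char) (k : Nat) (hk : 1 ≤ k) :
    pvInnerStepA res (k : Int) =
      if (res.getD k ' ' = '"' ∨ res.getD k ' ' = '\'') ∧ res.getD (k-1) ' ' ≠ '\\'
      then res.set k '\'' else res := by
  have hc : ((k : Int) - 1) = ((k - 1 : Nat) : Int) := by omega
  unfold pvInnerStepA
  rw [hc]
  simp only [PySem.List.pyGetD_natCast, PySem.List.pySetD_natCast]
  have hneg : ¬ (((k - 1 : Nat) : Int) < 0) := by omega
  by_cases hq : res.getD k ' ' = '"' ∨ res.getD k ' ' = '\''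
  · by_cases hbs : res.getD (k-1) ' ' ≠ '\\'
    · rw [if_pos ⟨hq, Or.inr hbs⟩, if_pos ⟨hq, hbs⟩]
    · rw [if_neg (by tauto), if_neg (by tauto)]
  · rw [if_neg (by tauto), if_neg (by tauto)]

theorem pvInner_getD (b : Nat) :
    ∀ (fuel k : Nat) (res : List Char), b ≤ res.length → b ≤ k + fuel → 1 ≤ k → ∀ t : Nat,
      ((PySem.List.pyRange (k : Int) (b : Int) 1).foldl pvInnerStepA res).getD t ' ' =
      if k ≤ t ∧ t < b ∧ (res.getD t ' ' = '"' ∨ res.getD t ' ' = '\'')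
          ∧ res.getD (t-1) ' ' ≠ '\\'
      then '\'' else res.getD t ' ' := by
  intro fuel
  induction fuel with
  | zero =>
    intro k res hb hf hk t
    rw [PySem.List.pyRange_one_eq_nil (by exact_mod_cast Nat.le_of_lt_succ (by omega))]
    rw [List.foldl_nil, if_neg (by omega)]
  | succ fuel ih =>
    intro k res hb hf hk t
    by_cases hkb : k < b
    · rw [PySem.List.pyRange_one_cons (by exact_mod_cast hkb), List.foldl_cons]
      have hcast : ((k : Int) + 1) = ((k + 1 : Nat) : Int) := by omega
      rw [pvInnerStepA_eq res k hk]
      by_cases hQ : (res.getD k ' ' = '"' ∨ res.getD k ' ' = '\'') ∧ res.getD (k-1) ' ' ≠ '\\'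
      · rw [if_pos hQ]
        have hlen : b ≤ (res.set k '\'').length := by simpa using hb
        have IH := ih (k+1) (res.set k '\'') hlen (by omega) (by omega) t
        rw [hcast, IH]
        by_cases ht : t = k
        · subst ht
          rw [if_neg (by omega), if_pos ⟨le_refl t, hkb, hQ⟩]
          rw [pv_getD_set, if_pos ⟨rfl, by omega⟩]
        · have hset_t : (res.set k '\'').getD t ' ' = res.getD t ' ' := by
            rw [pv_getD_set, if_neg (by tauto)]
          have hset_p : ((res.set k '\'').getD (t-1) ' ' ≠ '\\') ↔ (res.getD (t-1) ' ' ≠ '\\') := by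
            rw [pv_getD_set]
            by_cases hp : k = t - 1 ∧ k < res.length
            · rw [if_pos hp]
              have h2 : res.getD (t-1) ' ' ≠ '\\' := by
                rw [← hp.1]
                rcases hQ.1 with h | h <;> rw [h] <;> decide
              exact ⟨fun _ => h2, fun _ => by decide⟩
            · rw [if_neg hp]
          by_cases hc2 : k + 1 ≤ t ∧ t < b ∧ ((res.set k '\'').getD t ' ' = '"' ∨ (res.set k '\'').getD t ' ' = '\'') ∧ (res.set k '\'').getD (t-1) ' ' ≠ '\\'
          · rw [if_pos hc2]
            rw [if_pos ⟨by omega, hc2.2.1, by rw [← hset_t]; exact hc2.2.2.1, hset_p.mp hc2.2.2.2⟩]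
          · rw [if_neg hc2, hset_t]
            rw [if_neg (by
              intro hcon
              exact hc2 ⟨by omega, hcon.2.1, by rw [hset_t]; exact hcon.2.2.1, hset_p.mpr hcon.2.2.2⟩)]
      · rw [if_neg hQ]
        have IH := ih (k+1) res hb (by omega) (by omega) t
        rw [hcast, IH]
        by_cases ht : t = k
        · subst ht
          rw [if_neg (by omega), if_neg (by intro hcon; exact hQ ⟨hcon.2.2.1, hcon.2.2.2⟩)]
        · by_cases hc2 : k + 1 ≤ t ∧ t < b ∧ (res.getD t ' ' = '"' ∨ res.getD t ' ' = '\'') ∧ res.getD (t-1) ' ' ≠ '\\'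
          · rw [if_pos hc2, if_pos ⟨by omega, hc2.2⟩]
          · rw [if_neg hc2, if_neg (by intro hcon; exact hc2 ⟨by omega, hcon.2⟩)]
    · rw [PySem.List.pyRange_one_eq_nil (by exact_mod_cast (by omega : b ≤ k)), List.foldl_nil,
        if_neg (by omega)]

theorem pvQuote_iff (c : Char) : (c = '"' ∨ c = '\'') ↔ pvQuote c = true := by
  simp [pvQuote]

theorem pvRule_of_not (cs : List Char) (pairs : List (Nat × Nat)) (t : Nat)
    (h : ¬ (pvQuote (cs.getD t ' ') = true ∧ cs.getD (t-1) ' ' ≠ '\\')) :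
    pvRule cs pairs t = if pvEpAt pairs t then '"' else cs.getD t ' ' := by
  unfold pvRule
  rw [if_neg (fun hcon => h ⟨hcon.2.1, hcon.2.2⟩)]

theorem pvApplyAll (cs : List Char) :
    ∀ pairs : List (Nat × Nat), PairsOk cs pairs →
      (pairs.foldl pvApplyPairA cs).length = cs.length ∧
      ∀ t : Nat, (pairs.foldl pvApplyPairA cs).getD t ' ' = pvRule cs pairs t := by
  intro pairs
  induction pairs using List.reverseRecOn with
  | nil =>
    intro _
    refine ⟨rfl, fun t => ?_⟩
    unfold pvRule
    rw [if_neg (by simp [pvIn]), if_neg (by simp [pvEpAt])]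
    rfl
  | append_singleton ps p ih =>
    intro hOk
    have hOkps : PairsOk cs ps :=
      ⟨fun q hq => hOk.1 q (by simp [hq]), (List.pairwise_append.mp hOk.2).1⟩
    have hrel : ∀ q ∈ ps, q.2 < p.2 ∧ (q.2 < p.1 ∨ p.1 < q.1) := by
      intro q hq
      exact (List.pairwise_append.mp hOk.2).2.2 q hq p (by simp)
    obtain ⟨ha, hb2, hq1, hq2⟩ := hOk.1 p (by simp)
    obtain ⟨ihlen, ihpt⟩ := ih hOkps
    set X := ps.foldl pvApplyPairA cs with hX
    rw [List.foldl_append, List.foldl_cons, List.foldl_nil]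
    have hcast : ((p.1 : Int) + 1) = ((p.1 + 1 : Nat) : Int) := by omega
    have hstep : pvApplyPairA X p =
        (PySem.List.pyRange ((p.1 + 1 : Nat) : Int) (p.2 : Int) 1).foldl pvInnerStepA
          ((X.set p.1 '"').set p.2 '"') := by
      unfold pvApplyPairA
      rw [hcast]
      simp only [PySem.List.pySetD_natCast]
    rw [hstep]
    have hr2len : ((X.set p.1 '"').set p.2 '"').length = cs.length := by
      simp [ihlen]
    have hInner := pvInner_getD p.2 p.2 (p.1+1)
      ((X.set p.1 '"').set p.2 '"')
      (by omega) (by omega) (by omega)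
    have hr2getD : ∀ t : Nat, ((X.set p.1 '"').set p.2 '"').getD t ' ' =
        if p.2 = t then '"' else if p.1 = t then '"' else pvRule cs ps t := by
      intro t
      rw [pv_getD_set, pv_getD_set]
      simp only [List.length_set, ihlen]
      by_cases e2 : p.2 = t
      · rw [if_pos ⟨e2, by omega⟩, if_pos e2]
      · rw [if_neg (by tauto), if_neg e2]
        by_cases e1 : p.1 = t
        · rw [if_pos ⟨e1, by omega⟩, if_pos e1]
        · rw [if_neg (by tauto), if_neg e1, ihpt t]
    have hIn1 : pvIn (ps ++ [p]) p.1 = 0 := by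
      unfold pvIn
      rw [List.countP_eq_zero]
      intro q hq
      simp only [List.mem_append, List.mem_singleton] at hq
      rcases hq with hq | rfl
      · have := hrel q hq; simp only [decide_eq_true_eq]; simp; omega
      · simp
    have hIn2 : pvIn (ps ++ [p]) p.2 = 0 := by
      unfold pvIn
      rw [List.countP_eq_zero]
      intro q hq
      simp only [List.mem_append, List.mem_singleton] at hq
      rcases hq with hq | rfl
      · have := hrel q hq; simp; omega
      · simp
    have hInPos : ∀ t : Nat, p.1 < t → t < p.2 → 0 < pvIn (ps ++ [p]) t := by
      intro t h1 h2
      unfold pvIn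
      rw [List.countP_pos_iff]
      exact ⟨p, by simp, by simp [h1, h2]⟩
    have hInEq : ∀ t : Nat, ¬ (p.1 < t ∧ t < p.2) → pvIn (ps ++ [p]) t = pvIn ps t := by
      intro t h
      unfold pvIn
      rw [List.countP_append]
      simp [h]
    have hEpA : ∀ t : Nat, pvEpAt (ps ++ [p]) t = (pvEpAt ps t || (p.1 == t || p.2 == t)) := by
      intro t
      simp [pvEpAt, List.any_append]
    refine ⟨by rw [pvInner_length]; exact hr2len, fun t => ?_⟩
    rw [hInner t]
    by_cases e1 : t = p.1
    · subst e1
      rw [if_neg (fun hcon => absurd hcon.1 (by omega))]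
      rw [hr2getD, if_neg (by omega), if_pos rfl]
      unfold pvRule
      rw [if_neg (fun hcon => by rw [hIn1] at hcon; exact absurd hcon.1 (lt_irrefl 0))]
      rw [if_pos (by rw [hEpA]; simp)]
    · by_cases e2 : t = p.2
      · subst e2
        rw [if_neg (fun hcon => absurd hcon.2.1 (by omega))]
        rw [hr2getD, if_pos rfl]
        unfold pvRule
        rw [if_neg (fun hcon => by rw [hIn2] at hcon; exact absurd hcon.1 (lt_irrefl 0))]
        rw [if_pos (by rw [hEpA]; simp)]
      · have h5 : (p.1 == t || p.2 == t) = false := by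
          simp only [Bool.or_eq_false_iff, beq_eq_false_iff_ne]
          exact ⟨fun h => e1 h.symm, fun h => e2 h.symm⟩
        have ht1 : ((X.set p.1 '"').set p.2 '"').getD t ' ' = pvRule cs ps t := by
          rw [hr2getD, if_neg (fun h => e2 h.symm), if_neg (fun h => e1 h.symm)]
        by_cases hint : p.1 < t ∧ t < p.2
        · have hprev : (((X.set p.1 '"').set p.2 '"').getD (t-1) ' ' ≠ '\\') ↔
              (cs.getD (t-1) ' ' ≠ '\\') := by
            rw [hr2getD, if_neg (by omega)]
            by_cases ep1 : p.1 = t - 1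
            · rw [if_pos ep1]
              exact ⟨fun _ => by rw [← ep1]; exact pvQuote_ne_bs _ hq1, fun _ => by decide⟩
            · rw [if_neg ep1]
              exact not_congr (pvRule_bs cs ps hOkps (t-1))
          have hquote : ((((X.set p.1 '"').set p.2 '"').getD t ' ' = '"' ∨
              ((X.set p.1 '"').set p.2 '"').getD t ' ' = '\'')) ↔
              pvQuote (cs.getD t ' ') = true := by
            rw [ht1, pvQuote_iff, pvRule_quote cs ps hOkps]
          by_cases hc : pvQuote (cs.getD t ' ') = true ∧ cs.getD (t-1) ' ' ≠ '\\'
          · rw [if_pos ⟨by omega, hint.2, hquote.mpr hc.1, hprev.mpr hc.2⟩]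
            unfold pvRule
            rw [if_pos ⟨hInPos t hint.1 hint.2, hc.1, hc.2⟩]
          · rw [if_neg (fun hcon => hc ⟨hquote.mp hcon.2.2.1, hprev.mp hcon.2.2.2⟩)]
            rw [ht1, pvRule_of_not cs ps t hc, pvRule_of_not cs (ps ++ [p]) t hc,
              hEpA t, h5, Bool.or_false]
        · rw [if_neg (fun hcon => hint ⟨by omega, hcon.2.1⟩)]
          rw [ht1]
          by_cases hc : pvQuote (cs.getD t ' ') = true ∧ cs.getD (t-1) ' ' ≠ '\\'
          · unfold pvRule
            rw [hInEq t hint, hEpA t, h5, Bool.or_false]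
          · rw [pvRule_of_not cs ps t hc, pvRule_of_not cs (ps ++ [p]) t hc,
              hEpA t, h5, Bool.or_false]

theorem pvScan_joint (cs : List Char) :
    ∀ (fuel i : Nat) (stack : List (Char × Nat)) (pairs : List (Nat × Nat)) (escaped : PySem.Set Nat),
      cs.length ≤ i + fuel →
      (∀ e ∈ escaped, e < i) →
      (∀ qp ∈ stack, qp.2 < i ∧ qp.2 < cs.length ∧ pvQuote (cs.getD qp.2 ' ') = true) →
      stack.Pairwise (fun x y => y.2 < x.2) →
      (∀ qp ∈ stack, ∀ P ∈ pairs, P.2 < qp.2 ∨ qp.2 < P.1) →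
      (∀ P ∈ pairs, P.2 < i) →
      PairsOk cs pairs →
      PairsOk cs (pvScanA cs i stack pairs escaped) ∧
      pvScanB cs i stack (pvEpA cs.length pairs) (pvDiffA cs.length pairs) =
        (pvEpA cs.length (pvScanA cs i stack pairs escaped),
         pvDiffA cs.length (pvScanA cs i stack pairs escaped)) := by
  intro fuel
  induction fuel with
  | zero =>
    intro i stack pairs escaped hf hesc hstk hpw hsep hcl hOk
    rw [pvScanA, pvScanB]
    rw [dif_neg (by omega), dif_neg (by omega)]
    exact ⟨hOk, rfl⟩
  | succ fuel ih =>
    intro i stack pairs escaped hf hesc hstk hpw hsep hcl hOk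
    by_cases hi : i < cs.length
    · rw [pvScanA, pvScanB, dif_pos hi, dif_pos hi]
      by_cases h2 : cs[i] = '\\' ∧ i + 1 < cs.length
      · rw [dif_pos h2, dif_pos h2]
        have hesc' : ∀ (e' : PySem.Set Nat), (∀ e ∈ e', e < i + 2) →
            PairsOk cs (pvScanA cs (i+2) stack pairs e') ∧
            pvScanB cs (i+2) stack (pvEpA cs.length pairs) (pvDiffA cs.length pairs) =
              (pvEpA cs.length (pvScanA cs (i+2) stack pairs e'),
               pvDiffA cs.length (pvScanA cs (i+2) stack pairs e')) := by
          intro e' he'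
          exact ih (i+2) stack pairs e' (by omega) he'
            (fun qp hq => ⟨by have := (hstk qp hq).1; omega, (hstk qp hq).2.1,
              (hstk qp hq).2.2⟩) hpw hsep
            (fun P hP => by have := hcl P hP; omega) hOk
        split
        · exact hesc' _ (by
            intro e he
            rcases (PySem.Set.mem_add escaped (i+1) e).mp he with h | h
            · have := hesc e h; omega
            · omega)
        · exact hesc' _ (fun e he => by have := hesc e he; omega)
      · rw [dif_neg h2, dif_neg h2]
        have hni : ¬ (i ∈ escaped) := fun hmem => absurd (hesc i hmem) (lt_irrefl i)
        have hgetDi : cs.getD i ' ' = cs[i] := List.getD_eq_getElem cs ' ' hi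
        by_cases hq : cs[i] = '"' ∨ cs[i] = '\''
        · rw [if_pos ⟨hq, hni⟩, if_pos hq]
          rcases stack with _ | ⟨⟨q, a⟩, tl⟩
          · exact ih (i+1) [(cs[i], i)] pairs escaped (by omega)
              (fun e he => by have := hesc e he; omega)
              (fun qp hq' => by
                simp only [List.mem_singleton] at hq'
                subst hq'
                exact ⟨by omega, hi, by rw [hgetDi]; exact (pvQuote_iff _).mp hq⟩)
              (by simp)
              (fun qp hq' => by
                simp only [List.mem_singleton] at hq'
                subst hq'
                exact fun P hP => Or.inl (hcl P hP))
              (fun P hP => by have := hcl P hP; omega) hOk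
          · dsimp only
            by_cases hqc : q = cs[i]
            · rw [if_pos hqc, if_pos hqc]
              have hai : a < i := (hstk (q, a) (by simp)).1
              have hc1 : ((a : Int) + 1) = ((a + 1 : Nat) : Int) := by omega
              have hEstep : PySem.List.pySetD (PySem.List.pySetD (pvEpA cs.length pairs) (a : Int) true) (i : Int) true =
                  pvEpA cs.length (pairs ++ [(a, i)]) := by
                simp only [pvEpA, List.foldl_append, List.foldl_cons, List.foldl_nil,
                  PySem.List.pySetD_natCast]
              have hDstep : PySem.List.pySetD
                    (PySem.List.pySetD (pvDiffA cs.length pairs) ((a : Int) + 1)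
                      (PySem.List.pyGetD (pvDiffA cs.length pairs) ((a : Int) + 1) 0 + 1))
                    (i : Int)
                    (PySem.List.pyGetD
                      (PySem.List.pySetD (pvDiffA cs.length pairs) ((a : Int) + 1)
                        (PySem.List.pyGetD (pvDiffA cs.length pairs) ((a : Int) + 1) 0 + 1)) (i : Int) 0 - 1) =
                  pvDiffA cs.length (pairs ++ [(a, i)]) := by
                rw [hc1]
                simp only [pvDiffA, List.foldl_append, List.foldl_cons, List.foldl_nil,
                  PySem.List.pySetD_natCast, PySem.List.pyGetD_natCast]
              rw [hEstep, hDstep]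
              have hOk' : PairsOk cs (pairs ++ [(a, i)]) := by
                constructor
                · intro P hP
                  rcases List.mem_append.mp hP with h | h
                  · exact hOk.1 P h
                  · rw [List.mem_singleton] at h
                    subst h
                    refine ⟨hai, hi, ?_, by rw [hgetDi]; exact (pvQuote_iff _).mp hq⟩
                    exact (hstk (q, a) (by simp)).2.2
                · rw [List.pairwise_append]
                  refine ⟨hOk.2, by simp, ?_⟩
                  intro Q hQ P hP
                  rw [List.mem_singleton] at hP
                  subst hP
                  exact ⟨hcl Q hQ, hsep (q, a) (by simp) Q hQ⟩
              exact ih (i+1) tl (pairs ++ [(a, i)]) escaped (by omega)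
                (fun e he => by have := hesc e he; omega)
                (fun qp hq' => by
                  have := hstk qp (by simp [hq'])
                  exact ⟨by omega, this.2.1, this.2.2⟩)
                ((List.pairwise_cons.mp hpw).2)
                (fun qp hq' P hP => by
                  rcases List.mem_append.mp hP with h | h
                  · exact hsep qp (by simp [hq']) P h
                  · rw [List.mem_singleton] at h
                    subst h
                    exact Or.inr ((List.pairwise_cons.mp hpw).1 qp hq'))
                (fun P hP => by
                  rcases List.mem_append.mp hP with h | h
                  · have := hcl P h; omega
                  · rw [List.mem_singleton] at h; subst h; omega)
                hOk'
            · rw [if_neg hqc, if_neg hqc]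
              exact ih (i+1) ((cs[i], i) :: (q, a) :: tl) pairs escaped (by omega)
                (fun e he => by have := hesc e he; omega)
                (fun qp hq' => by
                  rcases List.mem_cons.mp hq' with h | h
                  · subst h
                    exact ⟨by omega, hi, by rw [hgetDi]; exact (pvQuote_iff _).mp hq⟩
                  · have := hstk qp h
                    exact ⟨by omega, this.2.1, this.2.2⟩)
                (by
                  rw [List.pairwise_cons]
                  exact ⟨fun y hy => (hstk y hy).1, hpw⟩)
                (fun qp hq' P hP => by
                  rcases List.mem_cons.mp hq' with h | h
                  · subst h
                    exact Or.inl (hcl P hP)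
                  · exact hsep qp h P hP)
                (fun P hP => by have := hcl P hP; omega) hOk
        · rw [if_neg (fun hcon => hq hcon.1), if_neg hq]
          exact ih (i+1) stack pairs escaped (by omega)
            (fun e he => by have := hesc e he; omega)
            (fun qp hq' => ⟨by have := (hstk qp hq').1; omega, (hstk qp hq').2.1,
              (hstk qp hq').2.2⟩)
            hpw hsep
            (fun P hP => by have := hcl P hP; omega) hOk
    · rw [pvScanA, pvScanB, dif_neg hi, dif_neg hi]
      exact ⟨hOk, rfl⟩

theorem pvPass_eq (cs : List Char) (pairs : List (Nat × Nat)) (hOk : PairsOk cs pairs) :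
    ∀ (fuel j : Nat) (depth : Int) (acc : List Char),
      cs.length ≤ j + fuel →
      depth + (pvDiffA cs.length pairs).getD j 0 = (pvIn pairs j : Int) →
      pvPassB cs (pvEpA cs.length pairs) (pvDiffA cs.length pairs) j depth acc =
        acc ++ (List.range (cs.length - j)).map (fun t => pvRule cs pairs (j + t)) := by
  have hbnd : ∀ p ∈ pairs, p.1 < p.2 ∧ p.2 < cs.length :=
    fun p hp => ⟨(hOk.1 p hp).1, (hOk.1 p hp).2.1⟩
  intro fuel
  induction fuel with
  | zero =>
    intro j depth acc hf hinv
    rw [pvPassB, dif_neg (by omega)]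
    rw [show cs.length - j = 0 by omega]
    simp
  | succ fuel ih =>
    intro j depth acc hf hinv
    by_cases hj : j < cs.length
    · rw [pvPassB, dif_pos hj]
      have hdg : cs.getD j ' ' = cs[j] := List.getD_eq_getElem cs ' ' hj
      have hdepth : depth + PySem.List.pyGetD (pvDiffA cs.length pairs) (j : Int) 0 =
          (pvIn pairs j : Int) := by
        rw [PySem.List.pyGetD_natCast]; exact hinv
      have hinv' : (depth + PySem.List.pyGetD (pvDiffA cs.length pairs) (j : Int) 0) +
          (pvDiffA cs.length pairs).getD (j+1) 0 = (pvIn pairs (j+1) : Int) := by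
        have hsucc := pvIn_succ j pairs (fun p hp => (hOk.1 p hp).1)
        have hDval := pvDiffA_getD cs.length pairs hbnd (j+1)
        rw [hdepth, hDval]
        omega
      have hrange : (List.range (cs.length - j)).map (fun t => pvRule cs pairs (j + t)) =
          pvRule cs pairs j :: (List.range (cs.length - (j+1))).map
            (fun t => pvRule cs pairs ((j+1) + t)) := by
        rw [show cs.length - j = (cs.length - (j+1)) + 1 by omega, List.range_succ_eq_map,
          List.map_cons, List.map_map]
        simp only [Function.comp_def]
        congr 1
        refine List.map_congr_left ?_
        intro a _
        congr 1
        omega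
      have hrec : ∀ c : Char, c = pvRule cs pairs j →
          pvPassB cs (pvEpA cs.length pairs) (pvDiffA cs.length pairs) (j+1)
              (depth + PySem.List.pyGetD (pvDiffA cs.length pairs) (j : Int) 0) (acc ++ [c]) =
            acc ++ (List.range (cs.length - j)).map (fun t => pvRule cs pairs (j + t)) := by
        intro c hc
        rw [ih (j+1) _ (acc ++ [c]) (by omega) hinv', hrange, hc]
        simp
      have hEg : PySem.List.pyGetD (pvEpA cs.length pairs) (j : Int) false = pvEpAt pairs j := by
        rw [PySem.List.pyGetD_natCast]
        exact pvEpA_getD cs.length pairs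
          (fun p hp => ⟨by have := hbnd p hp; omega, (hbnd p hp).2⟩) j
      by_cases hR : 0 < pvIn pairs j ∧ pvQuote (cs.getD j ' ') = true ∧ cs.getD (j-1) ' ' ≠ '\\'
      · have hj1 : 1 ≤ j := by
          obtain ⟨p, hp, hdp⟩ := List.countP_pos_iff.mp hR.1
          simp only [decide_eq_true_eq] at hdp
          omega
        have hcast : ((j : Int) - 1) = ((j - 1 : Nat) : Int) := by omega
        rw [if_pos ⟨by rw [hdepth]; exact_mod_cast hR.1,
          (pvQuote_iff _).mpr (hdg ▸ hR.2.1),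
          by rw [hcast, PySem.List.pyGetD_natCast]; exact hR.2.2⟩]
        refine hrec '\'' ?_
        unfold pvRule
        rw [if_pos hR]
      · rw [if_neg (by
          intro hcon
          apply hR
          have h0 : 0 < pvIn pairs j := by
            have := hcon.1
            rw [hdepth] at this
            exact_mod_cast this
          have hj1 : 1 ≤ j := by
            obtain ⟨p, hp, hdp⟩ := List.countP_pos_iff.mp h0
            simp only [decide_eq_true_eq] at hdp
            omega
          have hcast : ((j : Int) - 1) = ((j - 1 : Nat) : Int) := by omega
          refine ⟨h0, by rw [hdg]; exact (pvQuote_iff _).mp hcon.2.1, ?_⟩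
          have := hcon.2.2
          rw [hcast, PySem.List.pyGetD_natCast] at this
          exact this)]
        rw [hEg]
        by_cases hE : pvEpAt pairs j = true
        · rw [if_pos hE]
          refine hrec '"' ?_
          unfold pvRule
          rw [if_neg hR, if_pos hE]
        · rw [if_neg hE]
          refine hrec cs[j] ?_
          unfold pvRule
          rw [if_neg hR, if_neg hE, hdg]
    · rw [pvPassB, dif_neg hj]
      rw [show cs.length - j = 0 by omega]
      simp

theorem pv_main (cs : List Char) :
    (let pairs := pvScanA cs 0 [] [] PySem.Set.empty
     pairs.foldl pvApplyPairA cs) =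
    (let eb := pvScanB cs 0 [] (List.replicate cs.length false) (List.replicate (cs.length + 1) 0)
     pvPassB cs eb.1 eb.2 0 0 []) := by
  show (pvScanA cs 0 [] [] PySem.Set.empty).foldl pvApplyPairA cs = _
  have hjoint := pvScan_joint cs cs.length 0 [] [] PySem.Set.empty (by omega)
    (by intro e he; simp [PySem.Set.empty] at he)
    (by intro qp hq; simp at hq) (by simp)
    (by intro qp hq; simp at hq) (by intro P hP; simp at hP)
    ⟨by intro P hP; simp at hP, by simp⟩
  obtain ⟨hOk, hB⟩ := hjoint
  have hbnd : ∀ p ∈ pvScanA cs 0 [] [] PySem.Set.empty, p.1 < p.2 ∧ p.2 < cs.length :=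
    fun p hp => ⟨(hOk.1 p hp).1, (hOk.1 p hp).2.1⟩
  have hB' : pvScanB cs 0 [] (List.replicate cs.length false) (List.replicate (cs.length + 1) 0) =
      (pvEpA cs.length (pvScanA cs 0 [] [] PySem.Set.empty),
       pvDiffA cs.length (pvScanA cs 0 [] [] PySem.Set.empty)) := hB
  rw [hB']
  have hinv0 : (0 : Int) + (pvDiffA cs.length (pvScanA cs 0 [] [] PySem.Set.empty)).getD 0 0 =
      (pvIn (pvScanA cs 0 [] [] PySem.Set.empty) 0 : Int) := by
    rw [pvDiffA_getD cs.length _ hbnd 0, pvIn_zero]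
    have hz1 : (pvScanA cs 0 [] [] PySem.Set.empty).countP (fun p => p.1 + 1 == 0) = 0 := by
      rw [List.countP_eq_zero]
      intro p _
      simp
    have hz2 : (pvScanA cs 0 [] [] PySem.Set.empty).countP (fun p => p.2 == 0) = 0 := by
      rw [List.countP_eq_zero]
      intro p hp
      have := hbnd p hp
      simp
      omega
    rw [hz1, hz2]
    simp
  rw [pvPass_eq cs _ hOk cs.length 0 0 [] (by omega) hinv0]
  obtain ⟨hlen, hpt⟩ := pvApplyAll cs _ hOk
  apply List.ext_getElem
  · rw [hlen]
    simp
  · intro i h1 h2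
    rw [← List.getD_eq_getElem _ ' ' h1, hpt i]
    have h3 : i < cs.length := by rw [hlen] at h1; exact h1
    simp only [List.nil_append, List.getElem_map, List.getElem_range]
    congr 1
    omega

-- ===== VERDICT (by name: the statement is the Claim_ definition above) =====
theorem processQuotation_spec : Claim_equal_processQuotation := by
  intro s _
  show _ = _
  unfold processQuotation processQuotation_alt
  have hnorm : pvNormB s.toList = pvNormA s.toList := rfl
  rw [hnorm]
  exact congrArg String.ofList (pv_main (pvNormA s.toList))
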